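-- pv_equiv track=rewrite | github.com/KaiTries/Bleichenbacher-Attack-in-C | python/bleichenbacher_trimmers.py | zeroinpadding
-- ===== SOURCE A (Python) =====
-- def zeroinpadding(x):
--     for j in range(0, (len(x) - 1)):
--         if j % 2 == 0:
--             if x[j:(j + 2)] == "00":
--                 return 1
--             else:
--                 continue
--         else:
--             continue
--
-- def range(start, stop):
--     while start < stop:
--         yield start
--         start += 1
-- ===== SOURCE B (Python) =====
-- def zeroinpadding(x):
--     # Delegate the scan to str.find: enumerate occurrences of "00" and
--     # return 1 at the first occurrence that starts at an even index.
--     i = x.find("00")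
--     while i != -1:
--         if i % 2 == 0:
--             return 1
--         i = x.find("00", i + 1)
--     return None
-- ===== Notes on version B (the rewrite author's own statement) =====
-- stated objective: faster
-- what changed: B replaces A's even-index pair scan (range loop with an evenness test and a slice comparison at every index) by delegating the search to str.find: it enumerates occurrences of the double-zero substring and returns 1 at the first occurrence starting at an even index.
import Mathlib
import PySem

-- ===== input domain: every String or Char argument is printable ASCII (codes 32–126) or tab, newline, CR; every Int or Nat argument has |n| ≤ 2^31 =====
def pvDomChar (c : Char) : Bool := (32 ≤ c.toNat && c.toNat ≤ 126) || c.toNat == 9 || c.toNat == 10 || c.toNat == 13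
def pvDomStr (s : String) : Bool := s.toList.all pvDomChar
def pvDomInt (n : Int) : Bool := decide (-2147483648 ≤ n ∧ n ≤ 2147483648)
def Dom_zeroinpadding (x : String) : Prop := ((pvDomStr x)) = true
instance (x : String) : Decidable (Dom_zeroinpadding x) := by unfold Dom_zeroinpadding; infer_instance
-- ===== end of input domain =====

-- B finds occurrences of the substring "00" with str.find and returns 1 at the first
-- occurrence starting at an even index, instead of A's even-index scan with slices.

-- ===== PORT A =====
-- the loop body of A: for j in range(0, len(x)-1): if j%2==0: if x[j:j+2]=="00": return 1
def zeroinpaddingGo (x : String) : List Int → Option Int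
  | [] => none
  | j :: rest =>
    if PySem.Int.mod j 2 = 0 then
      if PySem.Str.slice x (some j) (some (j + 2)) = "00" then some 1
      else zeroinpaddingGo x rest
    else zeroinpaddingGo x rest

def zeroinpadding (x : String) : Option Int :=
  zeroinpaddingGo x (PySem.List.pyRange 0 (PySem.Str.len x - 1) 1)

-- ===== PORT B =====
-- i = x.find("00"); while i != -1: if i % 2 == 0: return 1; i = x.find("00", i + 1)
-- fuel only makes the loop total; each iteration strictly increases i, so len+1 suffices
def zeroinpaddingAltLoop (x : String) : Int → Nat → Option Int
  | _, 0 => none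
  | i, fuel + 1 =>
    if i = -1 then none
    else if PySem.Int.mod i 2 = 0 then some 1
    else zeroinpaddingAltLoop x (PySem.Str.findFrom x "00" (i + 1) none) fuel

def zeroinpadding_alt (x : String) : Option Int :=
  zeroinpaddingAltLoop x (PySem.Str.find x "00") (x.toList.length + 1)

-- ===== PRECONDITION & SPEC =====
def Spec_zeroinpadding (x : String) (out : Option Int) : Prop := out = zeroinpadding_alt x
instance (x : String) (out : Option Int) : Decidable (Spec_zeroinpadding x out) := by unfold Spec_zeroinpadding; infer_instance

-- ===== CLAIM (what is proved, stated in full; the proofs are below) =====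
def Claim_equal_zeroinpadding : Prop := ∀ (x : String), Dom_zeroinpadding x → Spec_zeroinpadding x (zeroinpadding x)

-- ===== LEMMAS AND PROOFS =====

-- proof-side common reference: the non-overlapping pairwise scan
def pvPairGo : List Char → Option Int
  | a :: b :: rest => if a = '0' ∧ b = '0' then some 1 else pvPairGo rest
  | _ => none

lemma pairGo_short (l : List Char) (h : l.length ≤ 1) : pvPairGo l = none := by
  match l, h with
  | [], _ => rfl
  | [a], _ => rfl

-- ===== A-side: zeroinpadding = pvPairGo =====
lemma goA_eq (x : String) : ∀ (n j : Nat), x.toList.length ≤ j + n → j % 2 = 0 →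
    zeroinpaddingGo x (PySem.List.pyRange (j : Int) ((x.toList.length : Int) - 1) 1)
      = pvPairGo (x.toList.drop j) := by
  intro n
  induction n with
  | zero =>
    intro j hn _
    rw [PySem.List.pyRange_one_eq_nil (by omega)]
    rw [pairGo_short _ (by simp only [List.length_drop]; omega)]
    rfl
  | succ n ih =>
    intro j hn hj
    by_cases hlt : (j : Int) < (x.toList.length : Int) - 1
    · have h2 : j + 2 ≤ x.toList.length := by omega
      obtain ⟨a, l1, hl1⟩ := List.exists_cons_of_ne_nil
        (List.ne_nil_of_length_pos (l := x.toList.drop j) (by simp only [List.length_drop]; omega))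
      obtain ⟨b, l2, hl2⟩ := List.exists_cons_of_ne_nil
        (List.ne_nil_of_length_pos (l := l1) (by
          have := congrArg List.length hl1
          simp only [List.length_drop, List.length_cons] at this; omega))
      have hdrop : x.toList.drop j = a :: b :: l2 := by rw [hl1, hl2]
      have hdrop2 : x.toList.drop (j + 2) = l2 := by
        have : x.toList.drop (j + 2) = (x.toList.drop j).drop 2 := by
          rw [List.drop_drop]
        simp [this, hdrop]
      rw [PySem.List.pyRange_one_cons hlt]
      have hmod : PySem.Int.mod (j : Int) 2 = 0 := by
        simp [PySem.Int.mod, Int.fmod_eq_emod]; omega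
      have hslice : (PySem.Str.slice x (some (j : Int)) (some ((j : Int) + 2)) = "00")
          ↔ (a = '0' ∧ b = '0') := by
        have : (PySem.Str.slice x (some (j : Int)) (some ((j : Int) + 2))).toList
            = [a, b] := by
          rw [PySem.Str.toList_slice]
          have : ((j : Int) + 2) = ((j + 2 : Nat) : Int) := by push_cast; ring
          rw [this, PySem.Chars.slice_eq_listSlice, PySem.List.slice_natCast, hdrop]
          simp
        constructor
        · intro h; rw [h] at this; simp at this
          exact ⟨this.1.symm, this.2.symm⟩
        · intro ⟨ha, hb⟩
          have h00 : (PySem.Str.slice x (some (j : Int)) (some ((j : Int) + 2))).toList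
              = ("00" : String).toList := by rw [this, ha, hb]; rfl
          exact String.toList_inj.mp h00
      simp only [zeroinpaddingGo, hmod, if_pos]
      by_cases hab : a = '0' ∧ b = '0'
      · rw [if_pos (hslice.mpr hab), hdrop, pvPairGo, if_pos hab]
      · rw [if_neg (fun h => hab (hslice.mp h)), hdrop, pvPairGo, if_neg hab]
        by_cases hlt2 : ((j : Int) + 1) < (x.toList.length : Int) - 1
        · rw [PySem.List.pyRange_one_cons hlt2]
          have hmod2 : ¬ PySem.Int.mod ((j : Int) + 1) 2 = 0 := by
            simp [PySem.Int.mod, Int.fmod_eq_emod]; omega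
          simp only [zeroinpaddingGo, hmod2, if_false]
          have : ((j : Int) + 1 + 1) = ((j + 2 : Nat) : Int) := by push_cast; ring
          rw [this, ih (j + 2) (by omega) (by omega), hdrop2]
        · rw [PySem.List.pyRange_one_eq_nil (by omega)]
          rw [pairGo_short l2 (by
            have := congrArg List.length hdrop2
            simp only [List.length_drop] at this; omega)]
          rfl
    · rw [PySem.List.pyRange_one_eq_nil (by omega)]
      rw [pairGo_short _ (by simp only [List.length_drop]; omega)]
      rfl

lemma A_eq_pairGo (x : String) : zeroinpadding x = pvPairGo x.toList := by
  unfold zeroinpadding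
  rw [PySem.Str.len_eq]
  have h0 : (0 : Int) = ((0 : Nat) : Int) := rfl
  rw [h0, goA_eq x x.toList.length 0 (by omega) (by omega)]
  simp

-- ===== characterisation: pvPairGo l = some 1 iff "00" occurs at some even index =====
def pvOcc (l : List Char) (j : Nat) : Prop := ['0', '0'] <+: l.drop j

lemma pairGo_some_iff (l : List Char) :
    pvPairGo l = some 1 ↔ ∃ j, j % 2 = 0 ∧ pvOcc l j := by
  match l with
  | [] =>
    simp only [pvPairGo]
    constructor
    · intro hc; simp at hc
    · rintro ⟨j, _, hocc⟩
      have := hocc.length_le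
      simp at this
  | [a] =>
    simp only [pvPairGo]
    constructor
    · intro hc; simp at hc
    · rintro ⟨j, _, hocc⟩
      have := hocc.length_le
      unfold pvOcc at hocc
      have h1 := hocc.length_le
      rw [List.length_drop] at h1
      simp only [List.length_cons, List.length_nil] at h1
      omega
  | a :: b :: rest =>
    have ih := pairGo_some_iff rest
    by_cases hab : a = '0' ∧ b = '0'
    · simp only [pvPairGo, if_pos hab]
      constructor
      · intro _
        exact ⟨0, by omega, by simp [pvOcc, hab.1, hab.2]⟩
      · intro _; trivial
    · simp only [pvPairGo, if_neg hab]
      rw [ih]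
      constructor
      · rintro ⟨j, hj, hocc⟩
        refine ⟨j + 2, by omega, ?_⟩
        simpa [pvOcc] using hocc
      · rintro ⟨j, hj, hocc⟩
        match j, hj with
        | 0, _ =>
          exfalso
          unfold pvOcc at hocc
          simp only [List.drop_zero] at hocc
          rcases List.cons_prefix_cons.mp hocc with ⟨ha, h1⟩
          rcases List.cons_prefix_cons.mp h1 with ⟨hb, _⟩
          exact hab ⟨ha.symm, hb.symm⟩
        | (j' + 2), hj =>
          refine ⟨j', by omega, ?_⟩
          simpa [pvOcc] using hocc
termination_by l.length

lemma pairGo_dichotomy (l : List Char) : pvPairGo l = some 1 ∨ pvPairGo l = none := by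
  match l with
  | [] => right; rfl
  | [a] => right; rfl
  | a :: b :: rest =>
    have ih := pairGo_dichotomy rest
    by_cases hab : a = '0' ∧ b = '0'
    · left; simp [pvPairGo, hab]
    · simpa [pvPairGo, hab] using ih
termination_by l.length

-- ===== B-side: loop characterisation =====
lemma loop_neg_one (x : String) (fuel : Nat) : zeroinpaddingAltLoop x (-1) fuel = none := by
  cases fuel <;> simp [zeroinpaddingAltLoop]

lemma loop_dichotomy (x : String) (i : Int) (fuel : Nat) :
    zeroinpaddingAltLoop x i fuel = some 1 ∨ zeroinpaddingAltLoop x i fuel = none := by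
  induction fuel generalizing i with
  | zero => right; rfl
  | succ m ih =>
    simp only [zeroinpaddingAltLoop]
    split_ifs with h1 h2
    · right; rfl
    · left; rfl
    · exact ih _

lemma loop_some_iff (x : String) : ∀ (fuel k : Nat), k ≤ x.toList.length →
    x.toList.length < k + fuel →
    (zeroinpaddingAltLoop x
        (if PySem.Chars.find (x.toList.drop k) ['0','0'] = -1 then -1
         else (k : Int) + PySem.Chars.find (x.toList.drop k) ['0','0']) fuel = some 1
      ↔ ∃ j, k ≤ j ∧ j % 2 = 0 ∧ pvOcc x.toList j) := by
  intro fuel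
  induction fuel with
  | zero => intro k hk hlt; omega
  | succ m ih =>
    intro k hk hlt
    by_cases hf : PySem.Chars.find (x.toList.drop k) ['0','0'] = -1
    · rw [if_pos hf, loop_neg_one]
      constructor
      · intro hc; simp at hc
      · rintro ⟨j, hkj, _, hocc⟩
        exfalso
        have hnin : ¬ ['0','0'] <:+: x.toList.drop k :=
          (PySem.Chars.find_eq_neg_one_iff _ _).mp hf
        apply hnin
        unfold pvOcc at hocc
        have hdd : x.toList.drop j = (x.toList.drop k).drop (j - k) := by
          rw [List.drop_drop]; congr 1; omega
        rw [hdd] at hocc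
        exact hocc.isInfix.trans (List.drop_suffix (j - k) (x.toList.drop k)).isInfix
    · rw [if_neg hf]
      have hge := PySem.Chars.neg_one_le_find (x.toList.drop k) ['0','0']
      have hf0 : 0 ≤ PySem.Chars.find (x.toList.drop k) ['0','0'] := by omega
      obtain ⟨hpre, hmin⟩ := PySem.Chars.find_spec hf0
      set m0 := (PySem.Chars.find (x.toList.drop k) ['0','0']).toNat with hm0
      have hfc : PySem.Chars.find (x.toList.drop k) ['0','0'] = (m0 : Int) := by omega
      have hdd0 : x.toList.drop (k + m0) = (x.toList.drop k).drop m0 := by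
        rw [List.drop_drop, Nat.add_comm]
      have hocc0 : pvOcc x.toList (k + m0) := by
        unfold pvOcc; rw [hdd0]; exact hpre
      have hlen0 : k + m0 + 2 ≤ x.toList.length := by
        have h2 := hpre.length_le
        rw [List.length_drop, List.length_drop] at h2
        simp only [List.length_cons, List.length_nil] at h2
        omega
      have harg : (k : Int) + PySem.Chars.find (x.toList.drop k) ['0','0']
          = ((k + m0 : Nat) : Int) := by rw [hfc]; push_cast; ring
      rw [harg]
      have hne : ((k + m0 : Nat) : Int) ≠ -1 := by omega
      by_cases hev : (k + m0) % 2 = 0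
      · have hmod : PySem.Int.mod ((k + m0 : Nat) : Int) 2 = 0 := by
          simp [PySem.Int.mod, Int.fmod_eq_emod]; omega
        simp only [zeroinpaddingAltLoop, if_neg hne, if_pos hmod]
        constructor
        · intro _; exact ⟨k + m0, by omega, hev, hocc0⟩
        · intro _; trivial
      · have hmod : ¬ PySem.Int.mod ((k + m0 : Nat) : Int) 2 = 0 := by
          simp [PySem.Int.mod, Int.fmod_eq_emod]; omega
        simp only [zeroinpaddingAltLoop, if_neg hne, if_neg hmod]
        have hstep : ((k + m0 : Nat) : Int) + 1 = ((k + m0 + 1 : Nat) : Int) := by push_cast; ring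
        rw [PySem.Str.findFrom_eq, show ("00" : String).toList = ['0','0'] from rfl,
          hstep, PySem.Chars.findFrom_natCast x.toList ['0','0'] (k + m0 + 1) (by omega)]
        rw [ih (k + m0 + 1) (by omega) (by omega)]
        constructor
        · rintro ⟨j, hkj, hjev, hocc⟩
          exact ⟨j, by omega, hjev, hocc⟩
        · rintro ⟨j, hkj, hjev, hocc⟩
          refine ⟨j, ?_, hjev, hocc⟩
          by_contra hlt'
          have hjne : j ≠ k + m0 := by omega
          have hjk : j - k < m0 := by omega
          exfalso
          apply hmin (j - k) hjk
          unfold pvOcc at hocc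
          rw [show (x.toList.drop k).drop (j - k) = x.toList.drop j by
            rw [List.drop_drop]; congr 1; omega]
          exact hocc

lemma B_some_iff (x : String) :
    zeroinpadding_alt x = some 1 ↔ ∃ j, j % 2 = 0 ∧ pvOcc x.toList j := by
  unfold zeroinpadding_alt
  rw [PySem.Str.find_eq, show ("00" : String).toList = ['0','0'] from rfl]
  have hshape : PySem.Chars.find x.toList ['0','0']
      = (if PySem.Chars.find (x.toList.drop 0) ['0','0'] = -1 then -1
         else ((0 : Nat) : Int) + PySem.Chars.find (x.toList.drop 0) ['0','0']) := by
    by_cases h : PySem.Chars.find x.toList ['0','0'] = -1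
    · simp [h]
    · simp [List.drop_zero, h]
  rw [hshape, loop_some_iff x (x.toList.length + 1) 0 (by omega) (by omega)]
  constructor
  · rintro ⟨j, _, hjev, hocc⟩; exact ⟨j, hjev, hocc⟩
  · rintro ⟨j, hjev, hocc⟩; exact ⟨j, by omega, hjev, hocc⟩

-- ===== VERDICT (by name: the statement is the Claim_ definition above) =====
theorem zeroinpadding_spec : Claim_equal_zeroinpadding := by
  intro x _
  show zeroinpadding x = zeroinpadding_alt x
  rw [A_eq_pairGo]
  by_cases h : ∃ j, j % 2 = 0 ∧ pvOcc x.toList j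
  · rw [(pairGo_some_iff x.toList).mpr h, ((B_some_iff x).mpr h).symm]
  · rcases pairGo_dichotomy x.toList with h1 | h1
    · exact absurd ((pairGo_some_iff x.toList).mp h1) h
    · rcases loop_dichotomy x (PySem.Str.find x "00") (x.toList.length + 1) with h2 | h2
      · exact absurd ((B_some_iff x).mp h2) h
      · rw [h1]; exact h2.symm
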